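-- pv_equiv track=rewrite | github.com/levandow/grants-hello | app/normalize_utils.py | split_documents_vs_links
-- ===== SOURCE A (Python) =====
-- from typing import Any, Dict, List, Optional, Tuple
--
-- _DOC_KEYWORDS = (
--     "call", "work programme", "work program", "guide", "guidance",
--     "template", "terms", "conditions", "instructions"
-- )
--
-- def split_documents_vs_links(links: List[Dict[str, Optional[str]]]) -> Tuple[List[Dict[str, Any]], List[Dict[str, Any]]]:
--     """Heuristic: PDFs or labels suggesting formal documents → documents; others → links."""
--     docs, other = [], []
--     for l in links:
--         url = (l.get("url") or "").strip()
--         label = (l.get("label") or "").strip()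
--         lower = f"{label} {url}".lower()
--         is_pdf = url.lower().endswith(".pdf")
--         is_doc_like = is_pdf or any(k in lower for k in _DOC_KEYWORDS)
--         item = {"title": label or None, "description": None, "url": url, "lang": None,
--                 "primary": None, "filename": None, "external_id": None}
--         if is_doc_like:
--             docs.append(item)
--         else:
--             other.append({"label": label or None, "url": url})
--     # de-duplicate by URL
--     def dedupe(lst, key):
--         seen = set(); out=[]
--         for x in lst:
--             k = x.get(key)
--             if k and k not in seen:
--                 seen.add(k); out.append(x)
--         return out
--     return dedupe(docs, "url"), dedupe(other, "url")
-- ===== SOURCE B (Python) =====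
-- from typing import Any, Dict, List, Optional, Tuple
--
-- _DOC_KEYWORDS = (
--     "call", "work programme", "work program", "guide", "guidance",
--     "template", "terms", "conditions", "instructions"
-- )
--
-- def split_documents_vs_links(links: List[Dict[str, Optional[str]]]) -> Tuple[List[Dict[str, Any]], List[Dict[str, Any]]]:
--     """Single pass: classify and dedupe-by-URL inline with two seen sets."""
--     docs, other = [], []
--     seen_docs, seen_other = set(), set()
--     for l in links:
--         url = (l.get("url") or "").strip()
--         label = (l.get("label") or "").strip()
--         lower = f"{label} {url}".lower()
--         is_doc_like = url.lower().endswith(".pdf") or any(k in lower for k in _DOC_KEYWORDS)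
--         if not url:
--             continue
--         if is_doc_like:
--             if url not in seen_docs:
--                 seen_docs.add(url)
--                 docs.append({"title": label or None, "description": None, "url": url,
--                              "lang": None, "primary": None, "filename": None,
--                              "external_id": None})
--         else:
--             if url not in seen_other:
--                 seen_other.add(url)
--                 other.append({"label": label or None, "url": url})
--     return docs, other
-- ===== Notes on version B (the rewrite author's own statement) =====
-- stated objective: simpler
-- what changed: Replaces A's build-two-lists-then-dedupe-each structure (with a separate dedupe helper re-reading each item's url key) with one pass that classifies and dedupes inline, keeping two seen-URL sets and dropping empty-URL items immediately.
import Mathlib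
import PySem

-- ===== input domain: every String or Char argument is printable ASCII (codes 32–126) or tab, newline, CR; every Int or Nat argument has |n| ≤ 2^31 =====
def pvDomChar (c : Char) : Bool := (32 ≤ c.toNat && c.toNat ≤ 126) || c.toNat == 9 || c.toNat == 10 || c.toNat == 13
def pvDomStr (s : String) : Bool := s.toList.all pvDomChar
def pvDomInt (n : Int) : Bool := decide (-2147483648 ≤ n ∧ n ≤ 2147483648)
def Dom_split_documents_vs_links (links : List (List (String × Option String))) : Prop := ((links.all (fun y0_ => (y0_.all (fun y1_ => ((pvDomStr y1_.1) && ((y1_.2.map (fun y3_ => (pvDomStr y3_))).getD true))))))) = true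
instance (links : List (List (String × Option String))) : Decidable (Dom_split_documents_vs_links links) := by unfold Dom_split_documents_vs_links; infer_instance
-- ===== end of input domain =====

-- B replaces A's build-both-lists-then-dedupe-each structure with one fused pass that
-- classifies and dedupes inline with two seen-URL sets (objective: simpler, same cost).

-- shared per-link field computations (both Pythons compute these identically)
def pvKeywords : List String :=
  ["call", "work programme", "work program", "guide", "guidance",
   "template", "terms", "conditions", "instructions"]

-- l.get(k) or ""   (missing key or None value → "")
def pvGetStr (l : List (String × Option String)) (k : String) : String :=
  ((PySem.Dict.mk l).getD k none).getD ""

def pvUrl (l : List (String × Option String)) : String :=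
  PySem.Str.strip (pvGetStr l "url")

def pvLabel (l : List (String × Option String)) : String :=
  PySem.Str.strip (pvGetStr l "label")

def pvIsDocLike (label url : String) : Bool :=
  PySem.Str.endswith (PySem.Str.lower url) ".pdf" ||
  pvKeywords.any (fun k => PySem.Str.isIn k (PySem.Str.lower (label ++ " " ++ url)))

def pvDocItem (label url : String) : List (String × Option String) :=
  [("title", if label = "" then none else some label), ("description", none),
   ("url", some url), ("lang", none), ("primary", none), ("filename", none),
   ("external_id", none)]

def pvOtherItem (label url : String) : List (String × Option String) :=
  [("label", if label = "" then none else some label), ("url", some url)]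

-- ===== PORT A =====
-- A's classification loop body: append the item to docs or to other
def pvClassifyStep (acc : List (List (String × Option String)) × List (List (String × Option String)))
    (l : List (String × Option String)) :
    List (List (String × Option String)) × List (List (String × Option String)) :=
  let url := pvUrl l
  let label := pvLabel l
  if pvIsDocLike label url then (acc.1 ++ [pvDocItem label url], acc.2)
  else (acc.1, acc.2 ++ [pvOtherItem label url])

-- A's dedupe helper body: k = x.get("url"); if k and k not in seen: add & keep
def pvDedupeStep (acc : PySem.Set (Option String) × List (List (String × Option String)))
    (x : List (String × Option String)) :
    PySem.Set (Option String) × List (List (String × Option String)) :=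
  let k := (PySem.Dict.mk x).getD "url" none
  if k.getD "" ≠ "" ∧ k ∉ acc.1 then (acc.1.add k, acc.2 ++ [x]) else acc

def pvDedupe (lst : List (List (String × Option String))) : List (List (String × Option String)) :=
  (lst.foldl pvDedupeStep (PySem.Set.empty, [])).2

def split_documents_vs_links (links : List (List (String × Option String))) :
    (List (List (String × Option String))) × (List (List (String × Option String))) :=
  let p := links.foldl pvClassifyStep ([], [])
  (pvDedupe p.1, pvDedupe p.2)

-- ===== PORT B =====
-- B's fused loop body: state = (docs, other, seen_docs, seen_other); skip empty urls,
-- append first occurrence per category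
def pvAltStep (st : List (List (String × Option String)) × List (List (String × Option String)) ×
      PySem.Set String × PySem.Set String) (l : List (String × Option String)) :
    List (List (String × Option String)) × List (List (String × Option String)) ×
      PySem.Set String × PySem.Set String :=
  let url := pvUrl l
  let label := pvLabel l
  if url = "" then st
  else if pvIsDocLike label url then
    if url ∈ st.2.2.1 then st
    else (st.1 ++ [pvDocItem label url], st.2.1, st.2.2.1.add url, st.2.2.2)
  else
    if url ∈ st.2.2.2 then st
    else (st.1, st.2.1 ++ [pvOtherItem label url], st.2.2.1, st.2.2.2.add url)

def split_documents_vs_links_alt (links : List (List (String × Option String))) :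
    (List (List (String × Option String))) × (List (List (String × Option String))) :=
  let st := links.foldl pvAltStep ([], [], PySem.Set.empty, PySem.Set.empty)
  (st.1, st.2.1)

-- ===== PRECONDITION & SPEC =====
def Spec_split_documents_vs_links (links : List (List (String × Option String))) (out : (List (List (String × Option String))) × (List (List (String × Option String)))) : Prop := out = split_documents_vs_links_alt links
instance (links : List (List (String × Option String))) (out : (List (List (String × Option String))) × (List (List (String × Option String)))) : Decidable (Spec_split_documents_vs_links links out) := by unfold Spec_split_documents_vs_links; infer_instance

-- ===== CLAIM (what is proved, stated in full; the proofs are below) =====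
def Claim_equal_split_documents_vs_links : Prop := ∀ (links : List (List (String × Option String))), Dom_split_documents_vs_links links → Spec_split_documents_vs_links links (split_documents_vs_links links)

-- ===== LEMMAS AND PROOFS =====

-- A's dedupe as a structural recursion (seen set threaded through)
def pvDD (seen : PySem.Set (Option String)) :
    List (List (String × Option String)) → List (List (String × Option String))
  | [] => []
  | x :: xs =>
    let k := (PySem.Dict.mk x).getD "url" none
    if k.getD "" ≠ "" ∧ k ∉ seen then x :: pvDD (seen.add k) xs else pvDD seen xs

def pvDocsOf (links : List (List (String × Option String))) : List (List (String × Option String)) :=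
  links.filterMap (fun l =>
    if pvIsDocLike (pvLabel l) (pvUrl l) then some (pvDocItem (pvLabel l) (pvUrl l)) else none)

def pvOthersOf (links : List (List (String × Option String))) : List (List (String × Option String)) :=
  links.filterMap (fun l =>
    if pvIsDocLike (pvLabel l) (pvUrl l) then none else some (pvOtherItem (pvLabel l) (pvUrl l)))

lemma pvKey_docItem (label url : String) :
    ((PySem.Dict.mk (pvDocItem label url)).getD "url" none) = some url := by
  simp [pvDocItem, PySem.Dict.getD_eq_get?_getD, PySem.Dict.get?_mk_cons]

lemma pvKey_otherItem (label url : String) :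
    ((PySem.Dict.mk (pvOtherItem label url)).getD "url" none) = some url := by
  simp [pvOtherItem, PySem.Dict.getD_eq_get?_getD, PySem.Dict.get?_mk_cons]

lemma pvDedupe_foldl (xs : List (List (String × Option String)))
    (seen : PySem.Set (Option String)) (out : List (List (String × Option String))) :
    (xs.foldl pvDedupeStep (seen, out)).2 = out ++ pvDD seen xs := by
  induction xs generalizing seen out with
  | nil => simp [pvDD]
  | cons x xs ih =>
    simp only [List.foldl_cons, pvDedupeStep, pvDD]
    split_ifs with h
    · rw [ih]; simp
    · rw [ih]

lemma pvClassify_foldl (links : List (List (String × Option String)))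
    (d o : List (List (String × Option String))) :
    links.foldl pvClassifyStep (d, o) = (d ++ pvDocsOf links, o ++ pvOthersOf links) := by
  induction links generalizing d o with
  | nil => simp [pvDocsOf, pvOthersOf]
  | cons l ls ih =>
    simp only [List.foldl_cons, pvClassifyStep, pvDocsOf, pvOthersOf, List.filterMap_cons]
    by_cases hb : pvIsDocLike (pvLabel l) (pvUrl l) = true
    · simp only [hb, if_pos]
      rw [ih]; simp [pvDocsOf, pvOthersOf]
    · simp only [Bool.not_eq_true] at hb
      simp only [hb, Bool.false_eq_true, ite_false]
      rw [ih]; simp [pvDocsOf, pvOthersOf]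

lemma pvAlt_foldl (links : List (List (String × Option String)))
    (d o : List (List (String × Option String))) (sd so : PySem.Set String)
    (sdA soA : PySem.Set (Option String))
    (hd : ∀ u : String, some u ∈ sdA ↔ u ∈ sd)
    (ho : ∀ u : String, some u ∈ soA ↔ u ∈ so) :
    (links.foldl pvAltStep (d, o, sd, so)).1 = d ++ pvDD sdA (pvDocsOf links) ∧
    (links.foldl pvAltStep (d, o, sd, so)).2.1 = o ++ pvDD soA (pvOthersOf links) := by
  induction links generalizing d o sd so sdA soA with
  | nil => simp [pvDocsOf, pvOthersOf, pvDD]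
  | cons l ls ih =>
    simp only [List.foldl_cons, pvAltStep, pvDocsOf, pvOthersOf, List.filterMap_cons]
    by_cases hb : pvIsDocLike (pvLabel l) (pvUrl l) = true
    · simp only [hb, ite_true]
      by_cases hu : pvUrl l = ""
      · simp only [hu, ite_true]
        have := ih d o sd so sdA soA hd ho
        simpa [pvDocsOf, pvOthersOf, pvDD, pvKey_docItem, hu] using this
      · simp only [hu, ite_false]
        by_cases hm : pvUrl l ∈ sd
        · simp only [hm, ite_true]
          have := ih d o sd so sdA soA hd ho
          have hmA : some (pvUrl l) ∈ sdA := (hd _).mpr hm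
          simpa [pvDocsOf, pvOthersOf, pvDD, pvKey_docItem, hu, hmA] using this
        · simp only [hm, ite_false]
          have hmA : some (pvUrl l) ∉ sdA := fun h => hm ((hd _).mp h)
          have hd' : ∀ u : String, some u ∈ sdA.add (some (pvUrl l)) ↔ u ∈ sd.add (pvUrl l) := by
            intro u
            simp [PySem.Set.mem_add, hd u]
          have := ih (d ++ [pvDocItem (pvLabel l) (pvUrl l)]) o (sd.add (pvUrl l)) so
            (sdA.add (some (pvUrl l))) soA hd' ho
          simpa [pvDocsOf, pvOthersOf, pvDD, pvKey_docItem, hu, hmA] using this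
    · simp only [Bool.not_eq_true] at hb
      simp only [hb, Bool.false_eq_true, ite_false]
      by_cases hu : pvUrl l = ""
      · simp only [hu, ite_true]
        have := ih d o sd so sdA soA hd ho
        simpa [pvDocsOf, pvOthersOf, pvDD, pvKey_otherItem, hu] using this
      · simp only [hu, ite_false]
        by_cases hm : pvUrl l ∈ so
        · simp only [hm, ite_true]
          have := ih d o sd so sdA soA hd ho
          have hmA : some (pvUrl l) ∈ soA := (ho _).mpr hm
          simpa [pvDocsOf, pvOthersOf, pvDD, pvKey_otherItem, hu, hmA] using this
        · simp only [hm, ite_false]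
          have hmA : some (pvUrl l) ∉ soA := fun h => hm ((ho _).mp h)
          have ho' : ∀ u : String, some u ∈ soA.add (some (pvUrl l)) ↔ u ∈ so.add (pvUrl l) := by
            intro u
            simp [PySem.Set.mem_add, ho u]
          have := ih d (o ++ [pvOtherItem (pvLabel l) (pvUrl l)]) sd (so.add (pvUrl l))
            sdA (soA.add (some (pvUrl l))) hd ho'
          simpa [pvDocsOf, pvOthersOf, pvDD, pvKey_otherItem, hu, hmA] using this

-- ===== VERDICT (by name: the statement is the Claim_ definition above) =====
theorem split_documents_vs_links_spec : Claim_equal_split_documents_vs_links := by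
  intro links _
  unfold Spec_split_documents_vs_links
  have hA : split_documents_vs_links links =
      (pvDD PySem.Set.empty (pvDocsOf links), pvDD PySem.Set.empty (pvOthersOf links)) := by
    unfold split_documents_vs_links pvDedupe
    rw [pvClassify_foldl]
    simp [pvDedupe_foldl]
  have hempty : ∀ u : String, some u ∈ (PySem.Set.empty : PySem.Set (Option String)) ↔
      u ∈ (PySem.Set.empty : PySem.Set String) := by
    intro u; simp [PySem.Set.empty]
  have hB := pvAlt_foldl links [] [] PySem.Set.empty PySem.Set.empty
    PySem.Set.empty PySem.Set.empty hempty hempty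
  unfold split_documents_vs_links_alt
  rw [hA, Prod.ext_iff]
  simpa using ⟨hB.1.symm, hB.2.symm⟩
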